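-- pv_equiv track=rewrite | github.com/MrBrantCode/unitest_baseline | mut_generate/mist_train_cf/cf_92259/solution.py | count_jokes
-- ===== SOURCE A (Python) =====
-- def count_jokes(input_string):
--     vowels = ['a', 'e', 'i', 'o', 'u']
--     consonants = [chr(i) for i in range(ord('a'), ord('z')+1) if chr(i) not in vowels]
--
--     # Check if the string is at least 5 characters long
--     if len(input_string) < 5:
--         return 0
--
--     # Check if the string contains at least one vowel and one consonant
--     has_vowel = any(char.lower() in vowels for char in input_string)
--     has_consonant = any(char.lower() in consonants for char in input_string)
--
--     if not has_vowel or not has_consonant: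
--         return 0
--
--     # Check if the string contains any special characters or numbers
--     for char in input_string:
--         if not char.isalpha():
--             return 0
--
--     # If all conditions are met, return 1
--     return 1
-- ===== SOURCE B (Python) =====
-- def count_jokes(input_string):
--     if len(input_string) < 5:
--         return 0
--     has_vowel = False
--     has_consonant = False
--     for char in input_string:
--         if not char.isalpha():
--             return 0
--         if char.lower() in ('a', 'e', 'i', 'o', 'u'):
--             has_vowel = True
--         else:
--             has_consonant = True
--     return 1 if has_vowel and has_consonant else 0
-- ===== Notes on version B (the rewrite author's own statement) =====
-- stated objective: simpler
-- what changed: A's three separate scans (any vowel, any consonant from a built 21-letter list, all alphabetic) are fused into one early-exit pass that returns 0 at the first non-letter and classifies each lowered letter as vowel or else consonant, so the consonant list is never built.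
import Mathlib
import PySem

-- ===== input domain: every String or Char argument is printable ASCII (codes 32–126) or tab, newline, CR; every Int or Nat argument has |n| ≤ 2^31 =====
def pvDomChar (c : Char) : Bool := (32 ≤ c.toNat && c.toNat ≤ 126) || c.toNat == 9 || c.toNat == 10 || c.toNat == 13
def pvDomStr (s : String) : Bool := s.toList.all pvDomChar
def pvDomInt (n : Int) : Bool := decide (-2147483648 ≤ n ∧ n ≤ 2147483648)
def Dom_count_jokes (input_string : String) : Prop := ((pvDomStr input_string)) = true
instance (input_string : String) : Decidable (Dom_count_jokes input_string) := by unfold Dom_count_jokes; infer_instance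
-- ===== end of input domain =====

-- B fuses A's three scans into one early-exit pass (consonant = alphabetic non-vowel); same return value, no side effects.

-- ===== PORT A =====
def count_jokes (input_string : String) : Int :=
  let vowels : List Char := ['a', 'e', 'i', 'o', 'u']
  let consonants : List Char :=
    ((PySem.List.pyRange 97 123 1).map (fun i => Char.ofNat i.toNat)).filter
      (fun ch => !(vowels.contains ch))
  let cs := input_string.toList
  if cs.length < 5 then 0
  else
    let has_vowel := cs.any (fun ch => vowels.contains (PySem.Chars.lowerChar ch))
    let has_consonant := cs.any (fun ch => consonants.contains (PySem.Chars.lowerChar ch))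
    if !has_vowel || !has_consonant then 0
    else if cs.any (fun ch => !(PySem.Chars.isalpha ch)) then 0
    else 1

-- ===== PORT B =====
def jokeLoop : List Char → Bool → Bool → Int
  | [], hv, hc => if hv && hc then 1 else 0
  | ch :: rest, hv, hc =>
    if !(PySem.Chars.isalpha ch) then 0
    else if (['a', 'e', 'i', 'o', 'u'] : List Char).contains (PySem.Chars.lowerChar ch) then
      jokeLoop rest true hc
    else
      jokeLoop rest hv true

def count_jokes_alt (input_string : String) : Int :=
  if input_string.toList.length < 5 then 0
  else jokeLoop input_string.toList false false

-- ===== PRECONDITION & SPEC =====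
def Spec_count_jokes (input_string : String) (out : Int) : Prop := out = count_jokes_alt input_string
instance (input_string : String) (out : Int) : Decidable (Spec_count_jokes input_string out) := by unfold Spec_count_jokes; infer_instance

-- ===== CLAIM (what is proved, stated in full; the proofs are below) =====
def Claim_equal_count_jokes : Prop := ∀ (input_string : String), Dom_count_jokes input_string → Spec_count_jokes input_string (count_jokes input_string)

-- ===== LEMMAS AND PROOFS =====

-- the vowel and consonant lists of A, as literals
def pvVow : List Char := ['a', 'e', 'i', 'o', 'u']
def pvCons : List Char :=
  ['b','c','d','f','g','h','j','k','l','m','n','p','q','r','s','t','v','w','x','y','z']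

theorem charLe_toNat {a c : Char} : a ≤ c ↔ a.toNat ≤ c.toNat := by
  rw [Char.le_def, UInt32.le_iff_toNat_le]; rfl

theorem pvKeyAllB :
    (List.range 26).all (fun k =>
      pvCons.contains (Char.ofNat (97 + k)) == !(pvVow.contains (Char.ofNat (97 + k)))) = true := by
  rfl

theorem pvKey (n : Nat) (h1 : 97 ≤ n) (h2 : n ≤ 122) :
    pvCons.contains (Char.ofNat n) = !(pvVow.contains (Char.ofNat n)) := by
  have hm : n - 97 ∈ List.range 26 := List.mem_range.mpr (by omega)
  have h := List.all_eq_true.mp pvKeyAllB _ hm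
  have hn : 97 + (n - 97) = n := by omega
  rw [hn] at h
  exact eq_of_beq h

theorem pvConsBoundsB :
    pvCons.all (fun x => decide (97 ≤ x.toNat) && decide (x.toNat ≤ 122)) = true := by rfl

theorem pvConsBounds : ∀ x ∈ pvCons, 97 ≤ x.toNat ∧ x.toNat ≤ 122 := by
  intro x hx
  have h := List.all_eq_true.mp pvConsBoundsB x hx
  rcases Bool.and_eq_true_iff.mp h with ⟨h1, h2⟩
  exact ⟨of_decide_eq_true h1, of_decide_eq_true h2⟩

-- per character: A's "lowered char is a consonant" equals B's "alphabetic and lowered char not a vowel"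
theorem perChar (c : Char) :
    pvCons.contains (PySem.Chars.lowerChar c)
      = (PySem.Chars.isalpha c && !(pvVow.contains (PySem.Chars.lowerChar c))) := by
  by_cases hu : PySem.Chars.isupper c = true
  · have hpair := (Bool.and_eq_true _ _).mp hu
    have hlo : 65 ≤ c.toNat := charLe_toNat.mp (of_decide_eq_true hpair.1)
    have hb : c.toNat ≤ 90 := charLe_toNat.mp (of_decide_eq_true hpair.2)
    have hlc : PySem.Chars.lowerChar c = Char.ofNat (c.toNat + 32) := by
      simp [PySem.Chars.lowerChar, hu]
    have ha : PySem.Chars.isalpha c = true := by simp [PySem.Chars.isalpha, hu]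
    rw [hlc, ha, Bool.true_and]
    exact pvKey (c.toNat + 32) (by omega) (by omega)
  · by_cases hl : PySem.Chars.islower c = true
    · have hpair := (Bool.and_eq_true _ _).mp hl
      have hlo : 97 ≤ c.toNat := charLe_toNat.mp (of_decide_eq_true hpair.1)
      have hb : c.toNat ≤ 122 := charLe_toNat.mp (of_decide_eq_true hpair.2)
      have hlc : PySem.Chars.lowerChar c = c := by simp [PySem.Chars.lowerChar, hu]
      have ha : PySem.Chars.isalpha c = true := by simp [PySem.Chars.isalpha, hl]
      have hkey := pvKey c.toNat hlo hb
      rw [Char.ofNat_toNat] at hkey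
      rw [hlc, ha, Bool.true_and]
      exact hkey
    · have hlc : PySem.Chars.lowerChar c = c := by simp [PySem.Chars.lowerChar, hu]
      have hna : PySem.Chars.isalpha c = false := by simp [PySem.Chars.isalpha, hu, hl]
      have hcc : pvCons.contains c = false := by
        cases hm : pvCons.contains c with
        | false => rfl
        | true =>
          have hmem := List.mem_of_elem_eq_true hm
          have hbd := pvConsBounds c hmem
          exact absurd
            (Bool.and_eq_true_iff.mpr
              ⟨decide_eq_true (charLe_toNat.mpr (show ('a' : Char).toNat ≤ c.toNat from hbd.1)),
               decide_eq_true (charLe_toNat.mpr (show c.toNat ≤ ('z' : Char).toNat from hbd.2))⟩)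
            (by simpa [PySem.Chars.islower] using hl)
      rw [hlc, hna, Bool.false_and]
      exact hcc

-- B's fused loop computes A's three scans
theorem jokeLoop_eq (cs : List Char) : ∀ hv hc : Bool,
    jokeLoop cs hv hc =
      if cs.any (fun ch => !(PySem.Chars.isalpha ch)) then 0
      else if (hv || cs.any (fun ch => pvVow.contains (PySem.Chars.lowerChar ch)))
            && (hc || cs.any (fun ch => pvCons.contains (PySem.Chars.lowerChar ch))) then 1
      else 0 := by
  induction cs with
  | nil => intro hv hc; simp [jokeLoop]
  | cons ch rest ih =>
    intro hv hc
    by_cases ha : PySem.Chars.isalpha ch = true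
    · by_cases hvw : (['a', 'e', 'i', 'o', 'u'] : List Char).contains (PySem.Chars.lowerChar ch) = true
      · have hvwP : pvVow.contains (PySem.Chars.lowerChar ch) = true := by
          rw [pvVow]; exact hvw
        have hcn : pvCons.contains (PySem.Chars.lowerChar ch) = false := by
          rw [perChar, ha, hvwP]; rfl
        simp only [jokeLoop, List.any_cons, ha, hvw, hcn, pvVow, Bool.not_true,
          Bool.false_eq_true, if_false, if_true, Bool.false_or, Bool.true_or, Bool.or_true,
          Bool.true_and, Bool.and_true, ih]
      · have hvw' : (['a', 'e', 'i', 'o', 'u'] : List Char).contains (PySem.Chars.lowerChar ch) = false :=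
          Bool.eq_false_iff.mpr hvw
        have hvwP : pvVow.contains (PySem.Chars.lowerChar ch) = false := by
          rw [pvVow]; exact hvw'
        have hcn : pvCons.contains (PySem.Chars.lowerChar ch) = true := by
          rw [perChar, ha, hvwP]; rfl
        simp only [jokeLoop, List.any_cons, ha, hvw', hcn, pvVow, Bool.not_true,
          Bool.false_eq_true, if_false, Bool.false_or, Bool.true_or, Bool.or_true,
          Bool.true_and, Bool.and_true, ih]
    · have ha' : PySem.Chars.isalpha ch = false := Bool.eq_false_iff.mpr ha
      simp only [jokeLoop, List.any_cons, ha', Bool.not_false, Bool.true_or, if_true]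

-- ===== VERDICT (by name: the statement is the Claim_ definition above) =====
theorem count_jokes_spec : Claim_equal_count_jokes := by
  intro s _
  show count_jokes s = count_jokes_alt s
  have hconsLit :
      (((PySem.List.pyRange 97 123 1).map (fun i => Char.ofNat i.toNat)).filter
        (fun ch => !((['a', 'e', 'i', 'o', 'u'] : List Char).contains ch))) = pvCons := by rfl
  simp only [count_jokes, count_jokes_alt, hconsLit, jokeLoop_eq, pvVow]
  by_cases hlen : s.toList.length < 5
  · simp only [hlen, if_true]
  · simp only [hlen, if_false]
    rcases Bool.dichotomy (s.toList.any (fun ch => !(PySem.Chars.isalpha ch))) with hna | hna <;>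
      rcases Bool.dichotomy (s.toList.any
          (fun ch => (['a', 'e', 'i', 'o', 'u'] : List Char).contains (PySem.Chars.lowerChar ch)))
          with hv | hv <;>
        rcases Bool.dichotomy (s.toList.any
            (fun ch => pvCons.contains (PySem.Chars.lowerChar ch))) with hc | hc <;>
          simp only [hna, hv, hc, Bool.not_true, Bool.not_false, Bool.or_true, Bool.or_false,
            Bool.and_true, Bool.and_false, Bool.or_self, Bool.false_eq_true, if_false, if_true]
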